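-- pv_equiv track=rewrite | github.com/AST-LW/Cryptographic-Methods | sha.py | __append_padding_bits
-- ===== SOURCE A (Python) =====
-- def __append_padding_bits(binary_string,number_of_bits=512):
--     length_of_message=len(binary_string)
--     i=1
--     while True:
--         if(number_of_bits*i<length_of_message):
--             i+=1
--             continue
--         else:
--             break
--     if number_of_bits==512:
--         subtract_bits=64
--     else:
--         subtract_bits=128
--     append_zero_bits=''.join(['0' for i in range(1,number_of_bits*i-subtract_bits-length_of_message)])
--     binary_string=binary_string+'1'+append_zero_bits
--     return binary_string
-- ===== SOURCE B (Python) =====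
-- def __append_padding_bits(binary_string, number_of_bits=512):
--     length = len(binary_string)
--     blocks = max(1, -(-length // number_of_bits))
--     subtract_bits = 64 if number_of_bits == 512 else 128
--     zeros = max(0, number_of_bits * blocks - subtract_bits - length - 1)
--     return binary_string + '1' + '0' * zeros
-- ===== Notes on version B (the rewrite author's own statement) =====
-- stated objective: simpler
-- what changed: Replaces the while-loop linear search for the block count with closed-form ceiling division clamped to 1, and the zero-building list comprehension with direct string repetition.
-- outside the precondition, e.g. on __append_padding_bits('', 0): A returns '1', B raises ZeroDivisionError
import Mathlib
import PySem

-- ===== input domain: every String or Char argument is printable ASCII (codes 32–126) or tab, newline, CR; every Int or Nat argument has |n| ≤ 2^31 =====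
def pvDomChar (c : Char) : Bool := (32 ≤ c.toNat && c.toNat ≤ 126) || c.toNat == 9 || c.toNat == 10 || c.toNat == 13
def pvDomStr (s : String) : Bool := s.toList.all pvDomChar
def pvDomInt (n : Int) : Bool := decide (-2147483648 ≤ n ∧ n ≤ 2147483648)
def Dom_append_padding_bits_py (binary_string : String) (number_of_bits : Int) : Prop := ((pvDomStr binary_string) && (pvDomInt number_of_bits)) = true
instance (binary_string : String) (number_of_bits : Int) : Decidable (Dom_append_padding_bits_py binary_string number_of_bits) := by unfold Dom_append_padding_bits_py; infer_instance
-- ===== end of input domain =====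

-- B removes A's while-loop search for the block count in favour of closed-form ceiling
-- division and builds the zero padding by direct repetition; objective: simpler.

-- ===== PORT A =====
-- the 'while True: if nb*i < length: i += 1 else: break' loop; fuel only makes it total
-- (with 0 < number_of_bits and fuel = length it never runs out)
def pvLoopA (nb len : Int) : Nat → Int → Int
  | 0, i => i
  | fuel + 1, i => if nb * i < len then pvLoopA nb len fuel (i + 1) else i

def append_padding_bits_py (binary_string : String) (number_of_bits : Int) : String :=
  let length_of_message : Int := PySem.Str.len binary_string
  let i : Int := pvLoopA number_of_bits length_of_message length_of_message.toNat 1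
  let subtract_bits : Int := if number_of_bits = 512 then 64 else 128
  let append_zero_bits : String :=
    String.mk ((PySem.List.pyRange 1 (number_of_bits * i - subtract_bits - length_of_message) 1).map (fun _ => '0'))
  binary_string ++ "1" ++ append_zero_bits

-- ===== PORT B =====
def append_padding_bits_py_alt (binary_string : String) (number_of_bits : Int) : String :=
  let length : Int := PySem.Str.len binary_string
  let blocks : Int := max 1 (-(PySem.Int.floordiv (-length) number_of_bits))
  let subtract_bits : Int := if number_of_bits = 512 then 64 else 128
  let zeros : Int := max 0 (number_of_bits * blocks - subtract_bits - length - 1)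
  binary_string ++ "1" ++ String.mk (List.replicate zeros.toNat '0')

-- ===== PRECONDITION & SPEC =====
-- Pre_ excludes number_of_bits ≤ 0: there A's while-loop diverges for every nonempty
-- string (and for any negative count), except on the empty string with count zero, where A returns a lone one-bit while B's
-- ceiling division raises ZeroDivisionError.
def Pre_append_padding_bits_py (binary_string : String) (number_of_bits : Int) : Prop :=
  0 < number_of_bits
instance (binary_string : String) (number_of_bits : Int) : Decidable (Pre_append_padding_bits_py binary_string number_of_bits) := by unfold Pre_append_padding_bits_py; infer_instance

def pvWitness_append_padding_bits_py : String × Int := ("0110", 512)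

def Spec_append_padding_bits_py (binary_string : String) (number_of_bits : Int) (out : String) : Prop := out = append_padding_bits_py_alt binary_string number_of_bits
instance (binary_string : String) (number_of_bits : Int) (out : String) : Decidable (Spec_append_padding_bits_py binary_string number_of_bits out) := by unfold Spec_append_padding_bits_py; infer_instance

-- ===== CLAIM (what is proved, stated in full; the proofs are below) =====
def Claim_equal_append_padding_bits_py : Prop := ∀ (binary_string : String) (number_of_bits : Int), Dom_append_padding_bits_py binary_string number_of_bits → Pre_append_padding_bits_py binary_string number_of_bits → Spec_append_padding_bits_py binary_string number_of_bits (append_padding_bits_py binary_string number_of_bits)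

-- ===== LEMMAS AND PROOFS =====

-- A's loop returns c whenever c is the least index ≥ 1 with nb*c ≥ len and the fuel covers c - i.
lemma pvLoopA_eq (nb len c : Int) (hnb : 0 < nb) (hcL : len ≤ nb * c)
    (hlt : ∀ j : Int, 1 ≤ j → j < c → nb * j < len) :
    ∀ (fuel : Nat) (i : Int), 1 ≤ i → i ≤ c → (c - i).toNat ≤ fuel → pvLoopA nb len fuel i = c := by
  intro fuel
  induction fuel with
  | zero =>
      intro i h1 h2 h3
      have : i = c := by omega
      simp [pvLoopA, this]
  | succ f ih =>
      intro i h1 h2 h3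
      rw [pvLoopA]
      split_ifs with h
      · have hic : i < c := by nlinarith
        exact ih (i + 1) (by omega) (by omega) (by omega)
      · by_contra hne
        have hic : i < c := by omega
        exact h (hlt i h1 hic)

lemma map_const_zero {α : Type} (l : List α) : l.map (fun _ => '0') = List.replicate l.length '0' := by
  induction l with
  | nil => rfl
  | cons x xs ih => simp [List.replicate, ih]

-- ===== VERDICT (by name: the statement is the Claim_ definition above) =====
theorem append_padding_bits_py_spec : Claim_equal_append_padding_bits_py := by
  intro s nb _ hpre
  unfold Spec_append_padding_bits_py append_padding_bits_py append_padding_bits_py_alt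
  have hnb : 0 < nb := hpre
  set L : Int := PySem.Str.len s with hL
  have hL0 : 0 ≤ L := by
    rw [hL, PySem.Str.len_eq]; positivity
  set q : Int := -(PySem.Int.floordiv (-L) nb) with hq
  have hbr : (q - 1) * nb < L ∧ L ≤ q * nb :=
    (PySem.Int.neg_floordiv_neg_eq_iff_of_pos hnb).mp hq.symm
  set c : Int := max 1 q with hc
  have hc1 : 1 ≤ c := le_max_left _ _
  have hcL : L ≤ nb * c := by
    rcases max_choice 1 q with h | h <;> rw [hc, h]
    · have hq1 : q ≤ 1 := by
        by_contra hgt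
        simp [max_eq_right (by omega : (1:Int) ≤ q)] at h
        omega
      nlinarith [hbr.2]
    · nlinarith [hbr.2]
  have hlt : ∀ j : Int, 1 ≤ j → j < c → nb * j < L := by
    intro j hj1 hjc
    have hcq : c = q := by
      rcases max_choice 1 q with h | h
      · omega
      · rw [hc, h]
    have : j ≤ q - 1 := by omega
    calc nb * j ≤ nb * (q - 1) := by nlinarith
      _ = (q - 1) * nb := by ring
      _ < L := hbr.1
  have hfuel : (c - 1).toNat ≤ L.toNat := by
    have : c - 1 ≤ L := by
      rcases max_choice 1 q with h | h
      · rw [hc, h]; omega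
      · have hq1 : 1 ≤ q := by
          by_contra hlt1
          simp [max_eq_left (by omega : q ≤ (1:Int))] at h
          omega
        rw [hc, h]
        nlinarith [hbr.1]
    omega
  have hloop : pvLoopA nb L L.toNat 1 = c :=
    pvLoopA_eq nb L c hnb hcL hlt L.toNat 1 le_rfl hc1 hfuel
  simp only [hloop]
  congr 1
  simp only [PySem.List.pyRange_one, List.map_map, Function.comp_def, map_const_zero,
    List.length_range, ← hq, ← hc]
  congr 1
  generalize (if nb = 512 then (64:Int) else 128) = sub
  congr 1
  omega
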